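-- pv_equiv track=rewrite | github.com/DataDialoger/tasks | sql_reasoning.py | _conditions_to_text
-- ===== SOURCE A (Python) =====
-- def _conditions_to_text(conditions):
--     readable_conditions = []
--     for cond in conditions:
--         # Replace SQL operators with readable text
--         readable = cond.replace(' LIKE ?', ' contains [value]')
--         readable = readable.replace(' = ?', ' equals [value]')
--         readable = readable.replace(' > ?', ' is greater than [value]')
--         readable = readable.replace(' < ?', ' is less than [value]')
--         readable = readable.replace(' >= ?', ' is at least [value]')
--         readable = readable.replace(' <= ?', ' is at most [value]')
--         readable = readable.replace(' != ?', ' is not [value]')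
--         readable_conditions.append(readable)
--
--     return ', '.join(readable_conditions)
-- ===== SOURCE B (Python) =====
-- def _conditions_to_text(conditions):
--     # Single left-to-right scan per condition: at each position emit the phrase
--     # for the operator token found there (longest-first), else copy the character.
--     def render(cond):
--         out = []
--         i = 0
--         n = len(cond)
--         while i < n:
--             if cond.startswith(' LIKE ?', i):
--                 out.append(' contains [value]'); i += 7
--             elif cond.startswith(' >= ?', i):
--                 out.append(' is at least [value]'); i += 5
--             elif cond.startswith(' <= ?', i):
--                 out.append(' is at most [value]'); i += 5
--             elif cond.startswith(' != ?', i):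
--                 out.append(' is not [value]'); i += 5
--             elif cond.startswith(' = ?', i):
--                 out.append(' equals [value]'); i += 4
--             elif cond.startswith(' > ?', i):
--                 out.append(' is greater than [value]'); i += 4
--             elif cond.startswith(' < ?', i):
--                 out.append(' is less than [value]'); i += 4
--             else:
--                 out.append(cond[i]); i += 1
--         return ''.join(out)
--     return ', '.join(render(c) for c in conditions)
-- ===== Notes on version B (the rewrite author's own statement) =====
-- stated objective: alternative
-- what changed: Replaces A's seven sequential whole-string str.replace passes per condition by one single left-to-right scan that, at each position, emits the phrase for the operator token found there (longest-first) or copies the character.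
import Mathlib
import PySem

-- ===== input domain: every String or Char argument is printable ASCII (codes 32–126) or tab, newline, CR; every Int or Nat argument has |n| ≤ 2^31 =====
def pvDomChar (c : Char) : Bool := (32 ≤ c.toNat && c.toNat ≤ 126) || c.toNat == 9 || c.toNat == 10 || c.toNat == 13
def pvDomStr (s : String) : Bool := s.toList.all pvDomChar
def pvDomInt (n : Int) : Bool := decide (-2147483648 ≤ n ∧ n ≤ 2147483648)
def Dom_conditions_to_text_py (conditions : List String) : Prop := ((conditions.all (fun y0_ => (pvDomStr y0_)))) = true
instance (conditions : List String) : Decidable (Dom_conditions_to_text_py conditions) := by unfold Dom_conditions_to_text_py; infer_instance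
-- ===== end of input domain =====

-- B replaces A's seven sequential whole-string replace passes per condition by one
-- single left-to-right scan emitting a phrase per operator token (alternative decomposition).


-- ===== PORT A =====
def conditions_to_text_py (conditions : List String) : String :=
  let readable_conditions := conditions.foldl (fun acc cond =>
    let readable := PySem.Str.replace cond " LIKE ?" " contains [value]"
    let readable := PySem.Str.replace readable " = ?" " equals [value]"
    let readable := PySem.Str.replace readable " > ?" " is greater than [value]"
    let readable := PySem.Str.replace readable " < ?" " is less than [value]"
    let readable := PySem.Str.replace readable " >= ?" " is at least [value]"
    let readable := PySem.Str.replace readable " <= ?" " is at most [value]"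
    let readable := PySem.Str.replace readable " != ?" " is not [value]"
    acc ++ [readable]) []
  PySem.Str.join ", " readable_conditions

-- ===== PORT B =====
-- single left-to-right scan over the characters of one condition (Source B's render loop;
-- the suffix list plays the role of the index i, startswith(tok, i) = isPrefixOf on it)
def scanCond : List Char → List Char
  | [] => []
  | c :: t =>
    if (" LIKE ?".toList).isPrefixOf (c :: t) then
      " contains [value]".toList ++ scanCond (List.drop 7 (c :: t))
    else if (" >= ?".toList).isPrefixOf (c :: t) then
      " is at least [value]".toList ++ scanCond (List.drop 5 (c :: t))
    else if (" <= ?".toList).isPrefixOf (c :: t) then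
      " is at most [value]".toList ++ scanCond (List.drop 5 (c :: t))
    else if (" != ?".toList).isPrefixOf (c :: t) then
      " is not [value]".toList ++ scanCond (List.drop 5 (c :: t))
    else if (" = ?".toList).isPrefixOf (c :: t) then
      " equals [value]".toList ++ scanCond (List.drop 4 (c :: t))
    else if (" > ?".toList).isPrefixOf (c :: t) then
      " is greater than [value]".toList ++ scanCond (List.drop 4 (c :: t))
    else if (" < ?".toList).isPrefixOf (c :: t) then
      " is less than [value]".toList ++ scanCond (List.drop 4 (c :: t))
    else
      c :: scanCond t
termination_by s => s.length
decreasing_by all_goals (simp only [List.length_drop, List.length_cons]; omega)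

def conditions_to_text_py_alt (conditions : List String) : String :=
  PySem.Str.join ", " (conditions.map (fun cond => String.ofList (scanCond cond.toList)))

-- ===== PRECONDITION & SPEC =====
def Spec_conditions_to_text_py (conditions : List String) (out : String) : Prop := out = conditions_to_text_py_alt conditions
instance (conditions : List String) (out : String) : Decidable (Spec_conditions_to_text_py conditions out) := by unfold Spec_conditions_to_text_py; infer_instance

-- ===== CLAIM (what is proved, stated in full; the proofs are below) =====
def Claim_equal_conditions_to_text_py : Prop := ∀ (conditions : List String), Dom_conditions_to_text_py conditions → Spec_conditions_to_text_py conditions (conditions_to_text_py conditions)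

-- ===== LEMMAS AND PROOFS =====

-- A's replace pass, as plain structural recursion on the subject list
def repl (old new : List Char) : List Char → List Char
  | [] => []
  | c :: t =>
    if h : old ≠ [] ∧ old.isPrefixOf (c :: t) then
      new ++ repl old new (List.drop old.length (c :: t))
    else
      c :: repl old new t
termination_by s => s.length
decreasing_by
  · simp only [List.length_drop, List.length_cons]
    have := List.length_pos_iff.mpr h.1
    omega
  · simp

-- A's seven (token, phrase) pairs, in A's replace order
def pvTableA : List (List Char × List Char) :=
  [(" LIKE ?".toList, " contains [value]".toList),
   (" = ?".toList, " equals [value]".toList),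
   (" > ?".toList, " is greater than [value]".toList),
   (" < ?".toList, " is less than [value]".toList),
   (" >= ?".toList, " is at least [value]".toList),
   (" <= ?".toList, " is at most [value]".toList),
   (" != ?".toList, " is not [value]".toList)]

def foldchain (L : List (List Char × List Char)) (s : List Char) : List Char :=
  L.foldl (fun s p => repl p.1 p.2 s) s

-- u and v disagree at some position below both lengths
def zipMis (u v : List Char) : Bool := (u.zip v).any (fun p => p.1 != p.2)
-- old mismatches every suffix of b (old can match nowhere inside b, even overhanging)
def transpB (old b : List Char) : Bool := (List.range b.length).all (fun k => zipMis old (b.drop k))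
-- every suffix of u mismatches v within both lengths
def suffMis (u v : List Char) : Bool := (List.range u.length).all (fun k => zipMis (u.drop k) v)

lemma repl_nil (o n : List Char) : repl o n [] = [] := by simp [repl]

lemma repl_cons_neg {o : List Char} (n : List Char) {c : Char} {t : List Char}
    (h : ¬ o <+: (c :: t)) : repl o n (c :: t) = c :: repl o n t := by
  rw [repl, dif_neg]
  intro hc
  exact h (List.isPrefixOf_iff_prefix.mp hc.2)

lemma repl_match {o : List Char} (n : List Char) (ho : o ≠ []) (r : List Char) :
    repl o n (o ++ r) = n ++ repl o n r := by
  obtain ⟨a, o', rfl⟩ : ∃ a o', o = a :: o' := by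
    cases o with
    | nil => exact absurd rfl ho
    | cons a o' => exact ⟨a, o', rfl⟩
  rw [List.cons_append, repl, dif_pos]
  · rw [show a :: (o' ++ r) = (a :: o') ++ r from rfl, List.drop_left]
  · exact ⟨ho, List.isPrefixOf_iff_prefix.mpr (by rw [show a :: (o' ++ r) = (a :: o') ++ r from rfl]; exact List.prefix_append _ _)⟩

lemma not_prefix_of_zipMis {u v : List Char} (h : zipMis u v = true) (x : List Char) :
    ¬ u <+: (v ++ x) := by
  induction u generalizing v with
  | nil => simp [zipMis] at h
  | cons a u ih =>
    cases v with
    | nil => simp [zipMis] at h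
    | cons b v =>
      intro hp
      rw [List.cons_append] at hp
      obtain ⟨hab, hp⟩ := List.cons_prefix_cons.mp hp
      simp only [zipMis, List.zip_cons_cons, List.any_cons, bne_iff_ne, ne_eq,
        Bool.or_eq_true] at h
      rcases h with h | h
      · exact h hab
      · exact ih h hp

lemma zipMis_of_transpB {o b : List Char} (h : transpB o b = true) {k : Nat}
    (hk : k < b.length) : zipMis o (b.drop k) = true := by
  simp only [transpB, List.all_eq_true, List.mem_range] at h
  exact h k hk

lemma transpB_tail {o : List Char} {c : Char} {b : List Char}
    (h : transpB o (c :: b) = true) : transpB o b = true := by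
  simp only [transpB, List.all_eq_true, List.mem_range] at h ⊢
  intro k hk
  have := h (k + 1) (by simpa using Nat.succ_lt_succ hk)
  simpa [List.drop_succ_cons] using this

lemma repl_transparent {o : List Char} (n : List Char) {b : List Char}
    (hb : transpB o b = true) (x : List Char) :
    repl o n (b ++ x) = b ++ repl o n x := by
  induction b with
  | nil => simp
  | cons c b ih =>
    have hz : zipMis o (c :: b) = true := by
      simpa using zipMis_of_transpB hb (k := 0) (by simp)
    rw [List.cons_append,
      repl_cons_neg n (by
        rw [show c :: (b ++ x) = (c :: b) ++ x from rfl]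
        exact not_prefix_of_zipMis hz x),
      ih (transpB_tail hb), List.cons_append]

lemma suffMis_zipMis {u v : List Char} (h : suffMis u v = true) (hu : u ≠ []) :
    zipMis u v = true := by
  simp only [suffMis, List.all_eq_true, List.mem_range] at h
  simpa using h 0 (List.length_pos_iff.mpr hu)

lemma suffMis_tail {a : Char} {u v : List Char} (h : suffMis (a :: u) v = true) :
    suffMis u v = true := by
  simp only [suffMis, List.all_eq_true, List.mem_range] at h ⊢
  intro k hk
  have := h (k + 1) (by simpa using Nat.succ_lt_succ hk)
  simpa [List.drop_succ_cons] using this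

-- a fragment u whose every suffix mismatches the phrase n can only be a prefix of the
-- OUTPUT of the pass where it was already a prefix of the input
lemma repl_pullback {o n : List Char} :
    ∀ s (u : List Char), suffMis u n = true → u <+: repl o n s → u <+: s := by
  intro s
  induction s using repl.induct o with
  | case1 => intro u hu hp; simpa [repl_nil] using hp
  | case2 c t h ih =>
    intro u hu hp
    rw [repl, dif_pos h] at hp
    cases u with
    | nil => exact List.nil_prefix
    | cons a u' =>
      exact absurd hp (not_prefix_of_zipMis (suffMis_zipMis hu (by simp)) _)
  | case3 c t h ih =>
    intro u hu hp
    rw [repl, dif_neg h] at hp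
    cases u with
    | nil => exact List.nil_prefix
    | cons a u' =>
      obtain ⟨hac, hp⟩ := List.cons_prefix_cons.mp hp
      exact List.cons_prefix_cons.mpr ⟨hac, ih u' (suffMis_tail hu) hp⟩

lemma foldchain_nil (L : List (List Char × List Char)) : foldchain L [] = [] := by
  induction L with
  | nil => rfl
  | cons p L ih => simp [foldchain, List.foldl_cons, repl_nil] at ih ⊢; exact ih

lemma foldchain_cons {L : List (List Char × List Char)} {c : Char} {t : List Char}
    (hnp : ∀ p ∈ L, ¬ p.1 <+: (c :: t))
    (hcross : ∀ p ∈ L, ∀ q ∈ L, suffMis p.1.tail q.2 = true) :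
    foldchain L (c :: t) = c :: foldchain L t := by
  induction L generalizing t with
  | nil => rfl
  | cons q L ih =>
    simp only [foldchain, List.foldl_cons]
    rw [repl_cons_neg q.2 (hnp q (by simp))]
    have hnp' : ∀ p ∈ L, ¬ p.1 <+: (c :: repl q.1 q.2 t) := by
      intro p hp hpre
      cases hu : p.1 with
      | nil => exact hnp p (by simp [hp]) (by simp [hu])
      | cons a u =>
        rw [hu] at hpre
        obtain ⟨hac, hpre⟩ := List.cons_prefix_cons.mp hpre
        have hsm : suffMis u q.2 = true := by
          have := hcross p (by simp [hp]) q (by simp)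
          simpa [hu] using this
        exact hnp p (by simp [hp])
          (by rw [hu]; exact List.cons_prefix_cons.mpr ⟨hac, repl_pullback t u hsm hpre⟩)
    exact ih hnp' (fun p hp q' hq' => hcross p (by simp [hp]) q' (by simp [hq']))

lemma foldchain_transparent {L : List (List Char × List Char)} {b : List Char}
    (h : ∀ p ∈ L, transpB p.1 b = true) (x : List Char) :
    foldchain L (b ++ x) = b ++ foldchain L x := by
  induction L generalizing x with
  | nil => rfl
  | cons q L ih =>
    simp only [foldchain, List.foldl_cons]
    rw [repl_transparent q.2 (h q (by simp))]
    exact ih (fun p hp => h p (by simp [hp])) (repl q.1 q.2 x)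

lemma foldchain_append (L1 L2 : List (List Char × List Char)) (s : List Char) :
    foldchain (L1 ++ L2) s = foldchain L2 (foldchain L1 s) := by
  simp [foldchain, List.foldl_append]

lemma foldchain_match {L1 L2 : List (List Char × List Char)} {o p : List Char}
    (ho : o ≠ [])
    (h1 : ∀ q ∈ L1, transpB q.1 o = true)
    (h2 : ∀ q ∈ L2, transpB q.1 p = true)
    (r : List Char) :
    foldchain (L1 ++ (o, p) :: L2) (o ++ r) = p ++ foldchain (L1 ++ (o, p) :: L2) r := by
  rw [foldchain_append, foldchain_append, foldchain_transparent h1 r]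
  simp only [foldchain, List.foldl_cons]
  rw [repl_match p ho, ← foldchain]
  exact foldchain_transparent h2 _

-- the heart: A's chained passes equal B's single scan, on every character list
lemma chain_eq_scan : ∀ (n : Nat) (l : List Char), l.length ≤ n →
    foldchain pvTableA l = scanCond l := by
  intro n
  induction n with
  | zero =>
    intro l hl
    have : l = [] := List.length_eq_zero_iff.mp (Nat.le_zero.mp hl)
    subst this
    rw [foldchain_nil, scanCond]
  | succ n ih =>
    intro l hl
    cases l with
    | nil => rw [foldchain_nil, scanCond]
    | cons c t =>
      rw [scanCond]
      by_cases h1 : (" LIKE ?".toList).isPrefixOf (c :: t)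
      · obtain ⟨r, hr⟩ := List.isPrefixOf_iff_prefix.mp h1
        rw [if_pos h1, ← hr,
          show List.drop 7 (" LIKE ?".toList ++ r) = r from by
            rw [show (7 : Nat) = (" LIKE ?".toList).length from by decide, List.drop_left],
          show pvTableA = [] ++ (" LIKE ?".toList, " contains [value]".toList) ::
            pvTableA.tail from rfl,
          foldchain_match (by decide) (by decide) (by decide) r,
          ← show pvTableA = [] ++ (" LIKE ?".toList, " contains [value]".toList) ::
            pvTableA.tail from rfl,
          ih r (by rw [← hr] at hl; simp at hl; omega)]
      rw [if_neg h1]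
      by_cases h2 : (" >= ?".toList).isPrefixOf (c :: t)
      · obtain ⟨r, hr⟩ := List.isPrefixOf_iff_prefix.mp h2
        rw [if_pos h2, ← hr,
          show List.drop 5 (" >= ?".toList ++ r) = r from by
            rw [show (5 : Nat) = (" >= ?".toList).length from by decide, List.drop_left],
          show pvTableA = (pvTableA.take 4) ++ (" >= ?".toList, " is at least [value]".toList) ::
            (pvTableA.drop 5) from rfl,
          foldchain_match (by decide) (by decide) (by decide) r,
          ← show pvTableA = (pvTableA.take 4) ++ (" >= ?".toList, " is at least [value]".toList) ::
            (pvTableA.drop 5) from rfl,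
          ih r (by rw [← hr] at hl; simp at hl; omega)]
      rw [if_neg h2]
      by_cases h3 : (" <= ?".toList).isPrefixOf (c :: t)
      · obtain ⟨r, hr⟩ := List.isPrefixOf_iff_prefix.mp h3
        rw [if_pos h3, ← hr,
          show List.drop 5 (" <= ?".toList ++ r) = r from by
            rw [show (5 : Nat) = (" <= ?".toList).length from by decide, List.drop_left],
          show pvTableA = (pvTableA.take 5) ++ (" <= ?".toList, " is at most [value]".toList) ::
            (pvTableA.drop 6) from rfl,
          foldchain_match (by decide) (by decide) (by decide) r,
          ← show pvTableA = (pvTableA.take 5) ++ (" <= ?".toList, " is at most [value]".toList) ::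
            (pvTableA.drop 6) from rfl,
          ih r (by rw [← hr] at hl; simp at hl; omega)]
      rw [if_neg h3]
      by_cases h4 : (" != ?".toList).isPrefixOf (c :: t)
      · obtain ⟨r, hr⟩ := List.isPrefixOf_iff_prefix.mp h4
        rw [if_pos h4, ← hr,
          show List.drop 5 (" != ?".toList ++ r) = r from by
            rw [show (5 : Nat) = (" != ?".toList).length from by decide, List.drop_left],
          show pvTableA = (pvTableA.take 6) ++ (" != ?".toList, " is not [value]".toList) ::
            [] from rfl,
          foldchain_match (by decide) (by decide) (by decide) r,
          ← show pvTableA = (pvTableA.take 6) ++ (" != ?".toList, " is not [value]".toList) ::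
            [] from rfl,
          ih r (by rw [← hr] at hl; simp at hl; omega)]
      rw [if_neg h4]
      by_cases h5 : (" = ?".toList).isPrefixOf (c :: t)
      · obtain ⟨r, hr⟩ := List.isPrefixOf_iff_prefix.mp h5
        rw [if_pos h5, ← hr,
          show List.drop 4 (" = ?".toList ++ r) = r from by
            rw [show (4 : Nat) = (" = ?".toList).length from by decide, List.drop_left],
          show pvTableA = (pvTableA.take 1) ++ (" = ?".toList, " equals [value]".toList) ::
            (pvTableA.drop 2) from rfl,
          foldchain_match (by decide) (by decide) (by decide) r,
          ← show pvTableA = (pvTableA.take 1) ++ (" = ?".toList, " equals [value]".toList) ::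
            (pvTableA.drop 2) from rfl,
          ih r (by rw [← hr] at hl; simp at hl; omega)]
      rw [if_neg h5]
      by_cases h6 : (" > ?".toList).isPrefixOf (c :: t)
      · obtain ⟨r, hr⟩ := List.isPrefixOf_iff_prefix.mp h6
        rw [if_pos h6, ← hr,
          show List.drop 4 (" > ?".toList ++ r) = r from by
            rw [show (4 : Nat) = (" > ?".toList).length from by decide, List.drop_left],
          show pvTableA = (pvTableA.take 2) ++ (" > ?".toList, " is greater than [value]".toList) ::
            (pvTableA.drop 3) from rfl,
          foldchain_match (by decide) (by decide) (by decide) r,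
          ← show pvTableA = (pvTableA.take 2) ++ (" > ?".toList, " is greater than [value]".toList) ::
            (pvTableA.drop 3) from rfl,
          ih r (by rw [← hr] at hl; simp at hl; omega)]
      rw [if_neg h6]
      by_cases h7 : (" < ?".toList).isPrefixOf (c :: t)
      · obtain ⟨r, hr⟩ := List.isPrefixOf_iff_prefix.mp h7
        rw [if_pos h7, ← hr,
          show List.drop 4 (" < ?".toList ++ r) = r from by
            rw [show (4 : Nat) = (" < ?".toList).length from by decide, List.drop_left],
          show pvTableA = (pvTableA.take 3) ++ (" < ?".toList, " is less than [value]".toList) ::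
            (pvTableA.drop 4) from rfl,
          foldchain_match (by decide) (by decide) (by decide) r,
          ← show pvTableA = (pvTableA.take 3) ++ (" < ?".toList, " is less than [value]".toList) ::
            (pvTableA.drop 4) from rfl,
          ih r (by rw [← hr] at hl; simp at hl; omega)]
      rw [if_neg h7]
      have hnp : ∀ p ∈ pvTableA, ¬ p.1 <+: (c :: t) := by
        intro p hp
        simp only [pvTableA, List.mem_cons, List.not_mem_nil, or_false] at hp
        rcases hp with rfl | rfl | rfl | rfl | rfl | rfl | rfl <;>
          (intro hpre; first
            | exact h1 (List.isPrefixOf_iff_prefix.mpr hpre)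
            | exact h2 (List.isPrefixOf_iff_prefix.mpr hpre)
            | exact h3 (List.isPrefixOf_iff_prefix.mpr hpre)
            | exact h4 (List.isPrefixOf_iff_prefix.mpr hpre)
            | exact h5 (List.isPrefixOf_iff_prefix.mpr hpre)
            | exact h6 (List.isPrefixOf_iff_prefix.mpr hpre)
            | exact h7 (List.isPrefixOf_iff_prefix.mpr hpre))
      rw [foldchain_cons hnp (by decide), ih t (by simpa using Nat.lt_succ_iff.mp (by simpa using hl))]

-- bridge: PySem.Chars.replace (fuel + accumulator) is repl, for a nonempty pattern
lemma go_eq_repl {old : List Char} (new : List Char) (ho : old ≠ []) :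
    ∀ (n : Nat) (l acc : List Char), l.length ≤ n →
      PySem.Chars.replace.go old new n l acc = acc.reverse ++ repl old new l := by
  intro n
  induction n with
  | zero =>
    intro l acc hl
    have : l = [] := List.length_eq_zero_iff.mp (Nat.le_zero.mp hl)
    subst this
    simp [PySem.Chars.replace.go, repl_nil]
  | succ n ih =>
    intro l acc hl
    cases l with
    | nil => simp [PySem.Chars.replace.go, repl_nil]
    | cons c t =>
      rw [PySem.Chars.replace.go]
      by_cases hp : old.isPrefixOf (c :: t)
      · rw [if_pos hp]
        have hpre := List.isPrefixOf_iff_prefix.mp hp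
        obtain ⟨r, hr⟩ := hpre
        have hlen : (List.drop old.length (c :: t)).length ≤ n := by
          have h1 : 0 < old.length := List.length_pos_iff.mpr ho
          simp only [List.length_drop, List.length_cons]
          simp only [List.length_cons] at hl
          omega
        rw [ih _ _ hlen, repl, dif_pos ⟨ho, hp⟩]
        simp
      · rw [if_neg hp, ih t (c :: acc) (by simp at hl; omega),
          repl_cons_neg new (fun hc => hp (List.isPrefixOf_iff_prefix.mpr hc))]
        simp

lemma chars_replace_eq_repl {old : List Char} (new : List Char) (ho : old ≠ []) (s : List Char) :
    PySem.Chars.replace s old new = repl old new s := by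
  rw [PySem.Chars.replace, if_neg (by simpa [List.isEmpty_iff] using ho)]
  simpa using go_eq_repl new ho s.length s [] le_rfl

-- A's per-condition value is the full chain, as a character list
lemma portA_cond (cond : String) :
    PySem.Str.replace (PySem.Str.replace (PySem.Str.replace (PySem.Str.replace
      (PySem.Str.replace (PySem.Str.replace (PySem.Str.replace cond
      " LIKE ?" " contains [value]") " = ?" " equals [value]") " > ?" " is greater than [value]")
      " < ?" " is less than [value]") " >= ?" " is at least [value]") " <= ?" " is at most [value]")
      " != ?" " is not [value]"
    = String.ofList (foldchain pvTableA cond.toList) := by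
  simp only [PySem.Str.replace, String.toList_ofList, foldchain, pvTableA, List.foldl_cons,
    List.foldl_nil]
  rw [chars_replace_eq_repl (old := " != ?".toList) " is not [value]".toList (by decide)]
  rw [chars_replace_eq_repl (old := " <= ?".toList) " is at most [value]".toList (by decide)]
  rw [chars_replace_eq_repl (old := " >= ?".toList) " is at least [value]".toList (by decide)]
  rw [chars_replace_eq_repl (old := " < ?".toList) " is less than [value]".toList (by decide)]
  rw [chars_replace_eq_repl (old := " > ?".toList) " is greater than [value]".toList (by decide)]
  rw [chars_replace_eq_repl (old := " = ?".toList) " equals [value]".toList (by decide)]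
  rw [chars_replace_eq_repl (old := " LIKE ?".toList) " contains [value]".toList (by decide)]

-- ===== VERDICT (by name: the statement is the Claim_ definition above) =====
theorem conditions_to_text_py_spec : Claim_equal_conditions_to_text_py := by
  intro conditions _
  unfold Spec_conditions_to_text_py conditions_to_text_py conditions_to_text_py_alt
  rw [PySem.List.foldl_append_singleton_eq_map]
  refine congrArg (PySem.Str.join ", ") (List.map_congr_left ?_)
  intro cond _
  rw [portA_cond, chain_eq_scan cond.toList.length cond.toList le_rfl]
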